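-- pv_equiv track=rewrite | github.com/Abdellatifemara/Forma | apps/api/scripts/train_proper.py | normalize_conversation
-- ===== SOURCE A (Python) =====
-- def normalize_conversation(conv):
--     """Apply consistent format to conversation"""
--     messages = []
--     for msg in conv.get("conversations", []):
--         role = msg.get("from", "")
--         value = msg.get("value", "")
--
--         # Clean up value
--         value = value.strip()
--         # Remove excessive newlines
--         while "\n\n\n" in value:
--             value = value.replace("\n\n\n", "\n\n")
--
--         messages.append({
--             "from": "human" if role == "human" else "gpt",
--             "value": value
--         })
--
--     return {"conversations": messages}
-- ===== SOURCE B (Python) =====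
-- def normalize_conversation(conv):
--     """Apply consistent format to conversation (single-pass newline collapsing)."""
--     messages = []
--     for msg in conv.get("conversations", []):
--         role = msg.get("from", "")
--         value = msg.get("value", "").strip()
--
--         # Collapse every run of 3+ newlines to exactly 2 in one left-to-right pass
--         out = []
--         run = 0
--         for ch in value:
--             if ch == "\n":
--                 if run < 2:
--                     out.append(ch)
--                     run += 1
--             else:
--                 out.append(ch)
--                 run = 0
--
--         messages.append({
--             "from": "human" if role == "human" else "gpt",
--             "value": "".join(out)
--         })
--
--     return {"conversations": messages}
-- ===== Notes on version B (the rewrite author's own statement) =====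
-- stated objective: alternative
-- what changed: The fixed-point while-loop that repeatedly rescans the string replacing '\n\n\n' with '\n\n' is replaced by a single left-to-right pass that copies characters while tracking a run counter of consecutive newlines and drops every newline after the second in a run; the outer message loop and role normalization are unchanged.
import Mathlib
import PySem

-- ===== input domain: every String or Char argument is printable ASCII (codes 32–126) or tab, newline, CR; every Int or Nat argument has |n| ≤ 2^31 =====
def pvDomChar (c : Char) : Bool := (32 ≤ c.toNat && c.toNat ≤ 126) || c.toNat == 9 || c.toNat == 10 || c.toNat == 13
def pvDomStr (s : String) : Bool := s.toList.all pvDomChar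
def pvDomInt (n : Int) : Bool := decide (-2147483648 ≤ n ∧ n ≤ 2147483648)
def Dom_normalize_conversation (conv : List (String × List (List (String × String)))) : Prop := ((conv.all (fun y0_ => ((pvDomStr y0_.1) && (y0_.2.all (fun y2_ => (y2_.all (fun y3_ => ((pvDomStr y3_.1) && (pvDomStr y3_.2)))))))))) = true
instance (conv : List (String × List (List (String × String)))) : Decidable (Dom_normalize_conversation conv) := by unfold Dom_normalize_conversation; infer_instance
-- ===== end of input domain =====

-- B replaces A's fixed-point while/replace newline cleanup with a single left-to-right pass
-- tracking a run counter; everything else (loop, role ternary, strip) is unchanged.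

-- ===== PORT A =====
-- A's while loop: repeatedly replace "\n\n\n" by "\n\n" until no occurrence.
-- Termination: each replace strictly shortens the string while a triple is present
-- (lemma pvReplShrink below, cited by name).
def pvRepl (l : List Char) : List Char :=
  if h : ['\n','\n','\n'].isPrefixOf l then '\n' :: '\n' :: pvRepl (l.drop 3)
  else
    match l with
    | [] => []
    | c :: t => c :: pvRepl t
termination_by l.length
decreasing_by
  · have := (List.isPrefixOf_iff_prefix.mp h).length_le
    simp at this ⊢; omega
  · simp

theorem pvRepl_nil : pvRepl [] = [] := by
  rw [pvRepl]; rfl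

theorem pvRepl_triple (t : List Char) :
    pvRepl ('\n'::'\n'::'\n'::t) = '\n'::'\n'::pvRepl t := by
  rw [pvRepl]; simp [List.isPrefixOf]

theorem pvRepl_cons (c : Char) (t : List Char)
    (h : ¬ (['\n','\n','\n'].isPrefixOf (c :: t) = true)) :
    pvRepl (c :: t) = c :: pvRepl t := by
  rw [pvRepl]; simp [h]

theorem pvRepl_go_eq (fuel : Nat) (l acc : List Char) (h : l.length ≤ fuel) :
    PySem.Chars.replace.go ['\n','\n','\n'] ['\n','\n'] fuel l acc
      = acc.reverse ++ pvRepl l := by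
  induction fuel generalizing l acc with
  | zero =>
    have : l = [] := by cases l <;> simp_all
    subst this
    rw [PySem.Chars.replace.go.eq_def]; simp [pvRepl_nil]
  | succ fuel ih =>
    cases l with
    | nil => rw [PySem.Chars.replace.go.eq_def]; simp [pvRepl_nil]
    | cons c t =>
      rw [PySem.Chars.replace.go.eq_def]
      by_cases hp : ['\n','\n','\n'].isPrefixOf (c :: t) = true
      · obtain ⟨r, hr⟩ := List.isPrefixOf_iff_prefix.mp hp
        simp only [hp, if_pos]
        have hdrop : (c :: t).drop (['\n','\n','\n'] : List Char).length = r := by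
          rw [← hr]; simp
        have hlen : r.length ≤ fuel := by
          have := congrArg List.length hr; simp at this h; omega
        rw [hdrop, ih r _ hlen]
        have hshape : c :: t = '\n'::'\n'::'\n'::r := by rw [← hr]; rfl
        rw [hshape, pvRepl_triple]; simp
      · simp only [hp, if_neg, Bool.not_eq_true]
        have hlen : t.length ≤ fuel := by simp at h; omega
        rw [ih t _ hlen, pvRepl_cons c t hp]; simp

theorem pvReplace_eq (l : List Char) :
    PySem.Chars.replace l ['\n','\n','\n'] ['\n','\n'] = pvRepl l := by
  rw [PySem.Chars.replace]
  simp [pvRepl_go_eq l.length l [] le_rfl]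

theorem pvRepl_length_le (l : List Char) : (pvRepl l).length ≤ l.length := by
  induction l using pvRepl.induct with
  | case1 l h ih =>
    obtain ⟨r, hr⟩ := List.isPrefixOf_iff_prefix.mp h
    have hshape : l = '\n'::'\n'::'\n'::r := by rw [← hr]; rfl
    have hdrop : l.drop 3 = r := by rw [← hr]; simp
    rw [hshape, pvRepl_triple]
    rw [hdrop] at ih
    simp; omega
  | case2 h => simp [pvRepl_nil]
  | case3 c t h ih =>
    rw [pvRepl_cons c t h]
    simp; omega

theorem pvReplShrink (l : List Char) (h : ['\n','\n','\n'] <:+: l) :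
    (pvRepl l).length < l.length := by
  induction l using pvRepl.induct with
  | case1 l hp ih =>
    obtain ⟨r, hr⟩ := List.isPrefixOf_iff_prefix.mp hp
    have hshape : l = '\n'::'\n'::'\n'::r := by rw [← hr]; rfl
    rw [hshape, pvRepl_triple]
    have := pvRepl_length_le r
    simp; omega
  | case2 hp => simp at h
  | case3 c t hp ih =>
    rw [pvRepl_cons c t hp]
    rcases List.infix_cons_iff.mp h with hpre | hinf
    · exact absurd (List.isPrefixOf_iff_prefix.mpr hpre) hp
    · have := ih hinf; simp; omega

-- the while loop of A, on the String it mutates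
def pvCleanA (s : String) : String :=
  if PySem.Str.isIn "\n\n\n" s then pvCleanA (PySem.Str.replace s "\n\n\n" "\n\n") else s
termination_by s.toList.length
decreasing_by
  rename_i h
  have hinf : ("\n\n\n" : String).toList <:+: s.toList := by
    exact (PySem.Chars.isIn_iff_infix _ _).mp (by simpa [PySem.Str.isIn] using h)
  have : ("\n\n\n" : String).toList = ['\n','\n','\n'] := by decide
  rw [this] at hinf
  rw [PySem.Str.toList_replace]
  have h2 : ("\n\n" : String).toList = ['\n','\n'] := by decide
  rw [this, h2, pvReplace_eq]
  exact pvReplShrink _ hinf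

def normalize_conversation (conv : List (String × List (List (String × String)))) : List (String × List (List (String × String))) :=
  let messages : List (List (String × String)) :=
    ((PySem.Dict.mk conv).getD "conversations" []).foldl (fun messages msg =>
      let role := (PySem.Dict.mk msg).getD "from" ""
      let value := (PySem.Dict.mk msg).getD "value" ""
      let value := PySem.Str.strip value
      let value := pvCleanA value
      messages ++ [[("from", if role == "human" then "human" else "gpt"), ("value", value)]]) []
  [("conversations", messages)]

-- ===== PORT B =====
-- B's inner for-loop over the characters of value ('ch == "\n"' compares the single
-- character; out is a list of characters joined at the end, String.ofList = "".join).
def pvCleanB (value : String) : String :=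
  let res := value.toList.foldl (fun acc ch =>
      if ch = '\n' then (if acc.2 < 2 then (acc.1 ++ [ch], acc.2 + 1) else acc)
      else (acc.1 ++ [ch], 0)) (([] : List Char), (0 : Nat))
  String.ofList res.1

def normalize_conversation_alt (conv : List (String × List (List (String × String)))) : List (String × List (List (String × String))) :=
  let messages : List (List (String × String)) :=
    ((PySem.Dict.mk conv).getD "conversations" []).foldl (fun messages msg =>
      let role := (PySem.Dict.mk msg).getD "from" ""
      let value := PySem.Str.strip ((PySem.Dict.mk msg).getD "value" "")
      let value := pvCleanB value
      messages ++ [[("from", if role == "human" then "human" else "gpt"), ("value", value)]]) []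
  [("conversations", messages)]

-- ===== PRECONDITION & SPEC =====
def Spec_normalize_conversation (conv : List (String × List (List (String × String)))) (out : List (String × List (List (String × String)))) : Prop := out = normalize_conversation_alt conv
instance (conv : List (String × List (List (String × String)))) (out : List (String × List (List (String × String)))) : Decidable (Spec_normalize_conversation conv out) := by unfold Spec_normalize_conversation; infer_instance

-- ===== CLAIM (what is proved, stated in full; the proofs are below) =====
def Claim_equal_normalize_conversation : Prop := ∀ (conv : List (String × List (List (String × String)))), Dom_normalize_conversation conv → Spec_normalize_conversation conv (normalize_conversation conv)

-- ===== LEMMAS AND PROOFS =====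

-- the one-pass collapse, as a structural recursion with the saturating run counter
def pvColl : List Char → Nat → List Char
  | [], _ => []
  | c :: t, k =>
    if c = '\n' then (if k < 2 then '\n' :: pvColl t (k+1) else pvColl t k)
    else c :: pvColl t 0

theorem pvFoldl_coll (l : List Char) (out : List Char) (run : Nat) :
    (l.foldl (fun acc ch =>
      if ch = '\n' then (if acc.2 < 2 then (acc.1 ++ [ch], acc.2 + 1) else acc)
      else (acc.1 ++ [ch], 0)) (out, run)).1 = out ++ pvColl l run := by
  induction l generalizing out run with
  | nil => simp [pvColl]
  | cons c t ih =>
    simp only [List.foldl_cons]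
    by_cases hc : c = '\n'
    · by_cases hr : run < 2
      · rw [if_pos hc, if_pos (show (out, run).2 < 2 from hr), ih]
        simp [pvColl, hc, hr]
      · rw [if_pos hc, if_neg (show ¬ (out, run).2 < 2 from hr), ih]
        simp [pvColl, hc, hr]
    · rw [if_neg hc, ih]
      simp [pvColl, hc]

-- one replace pass does not change the collapsed result
theorem pvColl_repl (l : List Char) : ∀ k, pvColl (pvRepl l) k = pvColl l k := by
  induction l using pvRepl.induct with
  | case1 l hp ih =>
    intro k
    obtain ⟨r, hr⟩ := List.isPrefixOf_iff_prefix.mp hp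
    have hshape : l = '\n'::'\n'::'\n'::r := by rw [← hr]; rfl
    have hdrop : l.drop 3 = r := by rw [← hr]; simp
    rw [hdrop] at ih
    rw [hshape, pvRepl_triple]
    rcases Nat.lt_or_ge k 2 with hk | hk
    · interval_cases k <;> simp [pvColl, ih]
    · have : ¬ k < 2 := by omega
      simp [pvColl, this, ih]
  | case2 hp => intro k; rw [pvRepl_nil]
  | case3 c t hp ih =>
    intro k
    rw [pvRepl_cons c t hp]
    by_cases hc : c = '\n' <;> by_cases hk : k < 2 <;> simp [pvColl, hc, hk, ih]

-- a triple-free string is a fixed point of the collapse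
theorem pvColl_id (l : List Char) : ∀ k, k ≤ 2 →
    ¬ (['\n','\n','\n'] <:+: (List.replicate k '\n' ++ l)) → pvColl l k = l := by
  induction l with
  | nil => intro k _ _; rfl
  | cons c t ih =>
    intro k hk h
    by_cases hc : c = '\n'
    · subst hc
      have hrep : List.replicate k '\n' ++ '\n' :: t = List.replicate (k+1) '\n' ++ t := by
        rw [List.replicate_succ']; simp
      rw [hrep] at h
      have hklt : k < 2 := by
        by_contra hge
        have hk2 : k = 2 := by omega
        subst hk2
        exact h ⟨[], t, by rfl⟩
      have hstep : pvColl ('\n' :: t) k = '\n' :: pvColl t (k+1) := by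
        simp [pvColl, hklt]
      rw [hstep, ih (k+1) (by omega) h]
    · simp only [pvColl, if_neg hc]
      have ht : ¬ (['\n','\n','\n'] <:+: ([] ++ t)) := by
        intro habs
        exact h (habs.trans ((List.suffix_cons c t).isInfix.trans
          (List.suffix_append (List.replicate k '\n') (c :: t)).isInfix))
      simpa using ih 0 (by omega) (by simpa using ht)

theorem pvCleanA_eq (s : String) :
    pvCleanA s = String.ofList (pvColl s.toList 0) := by
  induction s using pvCleanA.induct with
  | case1 s h ih =>
    rw [pvCleanA, if_pos h, ih]
    congr 1
    have h3 : ("\n\n\n" : String).toList = ['\n','\n','\n'] := by decide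
    have h2 : ("\n\n" : String).toList = ['\n','\n'] := by decide
    rw [PySem.Str.toList_replace, h3, h2, pvReplace_eq, pvColl_repl]
  | case2 s h =>
    rw [pvCleanA, if_neg h]
    have hni : ¬ (['\n','\n','\n'] <:+: s.toList) := by
      have := (PySem.Chars.isIn_eq_false_iff _ _).mp
        (by simpa [PySem.Str.isIn] using (Bool.not_eq_true _).mp h)
      exact this
    rw [pvColl_id s.toList 0 (by omega) (by simpa using hni)]
    simp

theorem pvClean_eq (v : String) : pvCleanA v = pvCleanB v := by
  rw [pvCleanA_eq, pvCleanB]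
  simp only [pvFoldl_coll]
  rfl

-- ===== VERDICT (by name: the statement is the Claim_ definition above) =====
theorem normalize_conversation_spec : Claim_equal_normalize_conversation := by
  intro conv _
  unfold Spec_normalize_conversation normalize_conversation normalize_conversation_alt
  simp only [pvClean_eq]
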